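-- pv_equiv track=rewrite | github.com/c1cadoidea/python-3-sem | lab6/task1.py | find_infected_fridges
-- ===== SOURCE A (Python) =====
-- def find_infected_fridges(data):
--     infected_indices = []
--     for index, line in enumerate(data, start=1):
--         pattern = "anton"
--         i = 0
--         for char in line:
--             if char == pattern[i]:
--                 i += 1
--                 if i == len(pattern):
--                     infected_indices.append(index)
--                     break
--     return infected_indices
-- ===== SOURCE B (Python) =====
-- def find_infected_fridges(data):
--     pattern = "anton"
--     infected_indices = []
--     for index, line in enumerate(data, start=1):
--         # occurrence index: for each pattern character, the sorted list of its positions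
--         occ = {ch: [i for i, c in enumerate(line) if c == ch] for ch in pattern}
--         cur = -1
--         ok = True
--         for ch in pattern:
--             lst = occ[ch]
--             lo, hi = 0, len(lst)
--             while lo < hi:  # binary search: first position strictly greater than cur
--                 mid = (lo + hi) // 2
--                 if lst[mid] <= cur:
--                     lo = mid + 1
--                 else:
--                     hi = mid
--             if lo == len(lst):
--                 ok = False
--                 break
--             cur = lst[lo]
--         if ok:
--             infected_indices.append(index)
--     return infected_indices
-- ===== Notes on version B (the rewrite author's own statement) =====
-- stated objective: alternative
-- what changed: B builds, per line, an occurrence index (dict mapping each pattern character to its sorted position list) and then matches the pattern by binary-searching each list for the first position after the previous match, instead of A's single left-to-right character scan with a manual pattern-index pointer.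
import Mathlib
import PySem

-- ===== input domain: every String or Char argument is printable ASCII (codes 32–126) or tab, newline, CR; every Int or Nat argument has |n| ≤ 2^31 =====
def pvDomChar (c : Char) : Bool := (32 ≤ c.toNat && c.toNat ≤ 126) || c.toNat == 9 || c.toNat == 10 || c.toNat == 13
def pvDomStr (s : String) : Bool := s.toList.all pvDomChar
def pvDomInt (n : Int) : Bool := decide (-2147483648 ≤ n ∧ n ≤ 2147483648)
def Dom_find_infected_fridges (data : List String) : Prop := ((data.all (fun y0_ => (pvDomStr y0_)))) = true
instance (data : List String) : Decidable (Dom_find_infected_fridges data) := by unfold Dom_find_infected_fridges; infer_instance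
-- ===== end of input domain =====

-- B replaces A's left-to-right scan with a pattern-index pointer by a per-line occurrence
-- index (dict: pattern char -> sorted position list) matched by binary search (alternative).

-- ===== PORT A =====
-- inner loop of A: scan the line's characters, advancing pattern index i; break (true) when i reaches 5
def pvScanA : List Char → Nat → Bool
  | [], _ => false
  | c :: cs, i =>
    if (("anton".toList)[i]? = some c) then
      (if i + 1 = 5 then true else pvScanA cs (i + 1))
    else pvScanA cs i

def pvLoopA : List String → Int → List Int
  | [], _ => []
  | line :: rest, idx =>
    if pvScanA line.toList 0 then idx :: pvLoopA rest (idx + 1)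
    else pvLoopA rest (idx + 1)

def find_infected_fridges (data : List String) : List Int := pvLoopA data 1

-- ===== PORT B =====
-- [i for i, c in enumerate(line) if c == ch]
def pvPosB : List Char → Char → Nat → List Int
  | [], _, _ => []
  | c :: cs, ch, i => if c = ch then (i : Int) :: pvPosB cs ch (i + 1) else pvPosB cs ch (i + 1)

-- occ = {ch: [i for i, c in enumerate(line) if c == ch] for ch in pattern}
def pvOccB (cs : List Char) : PySem.Dict Char (List Int) :=
  ("anton".toList).foldl (fun d ch => d.insert ch (pvPosB cs ch 0)) PySem.Dict.empty

-- while lo < hi: binary search for the first position strictly greater than cur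
-- (lst[mid] is in range whenever read, since mid < hi ≤ len(lst); ported with getD;
-- the fuel hi - lo only makes the loop total: it bounds the iteration count)
def pvBisGo : Nat → List Int → Int → Nat → Nat → Nat
  | 0, _, _, lo, _ => lo
  | Nat.succ n, lst, cur, lo, hi =>
    if lo < hi then
      let mid := (lo + hi) / 2
      if lst.getD mid 0 ≤ cur then pvBisGo n lst cur (mid + 1) hi
      else pvBisGo n lst cur lo mid
    else lo

def pvBisB (lst : List Int) (cur : Int) (lo hi : Nat) : Nat := pvBisGo (hi - lo) lst cur lo hi

-- the `for ch in pattern: … else:` loop; occ[ch] never raises (every pattern char is a key),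
-- and lst[lo] is read only when lo < len(lst): both ported with getD
def pvMatchB (occ : PySem.Dict Char (List Int)) : List Char → Int → Bool
  | [], _ => true
  | ch :: ps, cur =>
    let lst := (occ.get? ch).getD []
    let lo := pvBisB lst cur 0 lst.length
    if lo = lst.length then false
    else pvMatchB occ ps (lst.getD lo 0)

def pvLoopB : List String → Int → List Int
  | [], _ => []
  | line :: rest, idx =>
    if pvMatchB (pvOccB line.toList) "anton".toList (-1) then idx :: pvLoopB rest (idx + 1)
    else pvLoopB rest (idx + 1)

def find_infected_fridges_alt (data : List String) : List Int := pvLoopB data 1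

-- ===== PRECONDITION & SPEC =====
def Spec_find_infected_fridges (data : List String) (out : List Int) : Prop := out = find_infected_fridges_alt data
instance (data : List String) (out : List Int) : Decidable (Spec_find_infected_fridges data out) := by unfold Spec_find_infected_fridges; infer_instance

-- ===== CLAIM (what is proved, stated in full; the proofs are below) =====
def Claim_equal_find_infected_fridges : Prop := ∀ (data : List String), Dom_find_infected_fridges data → Spec_find_infected_fridges data (find_infected_fridges data)

-- ===== LEMMAS AND PROOFS =====

-- reference greedy consumption (proof-side only): `ch in it` on a list suffix
def pvConsume : List Char → Char → Option (List Char)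
  | [], _ => none
  | c :: cs, ch => if c = ch then some cs else pvConsume cs ch

def pvAllIn : List Char → List Char → Bool
  | [], _ => true
  | ch :: ps, it =>
    match pvConsume it ch with
    | none => false
    | some it' => pvAllIn ps it'

-- one step of the reference test when the head character misses the pattern head
theorem pvAllIn_cons_ne (p c : Char) (ps cs : List Char) (h : ¬ c = p) :
    pvAllIn (p :: ps) (c :: cs) = pvAllIn (p :: ps) cs := by
  simp [pvAllIn, pvConsume, h]

-- A's index-i scan of the line equals the reference test against the pattern's suffix from i
theorem pvScan_eq (cs : List Char) : ∀ i : Nat, i < 5 →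
    pvScanA cs i = pvAllIn (("anton".toList).drop i) cs := by
  induction cs with
  | nil =>
    intro i hi
    interval_cases i <;> simp [pvScanA, pvAllIn, pvConsume]
  | cons c cs ih =>
    intro i hi
    obtain ⟨p, hp⟩ : ∃ p, ("anton".toList)[i]? = some p := by
      interval_cases i <;> exact ⟨_, rfl⟩
    have hdrop : ("anton".toList).drop i = p :: ("anton".toList).drop (i + 1) := by
      interval_cases i <;> simp_all <;> exact hp
    rw [hdrop]
    by_cases h : c = p
    · subst h
      have hL : pvScanA (c :: cs) i =
          (if i + 1 = 5 then true else pvScanA cs (i + 1)) := by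
        simp only [pvScanA]
        rw [if_pos hp]
      have hR : pvAllIn (c :: ("anton".toList).drop (i + 1)) (c :: cs) =
          pvAllIn (("anton".toList).drop (i + 1)) cs := by
        simp [pvAllIn, pvConsume]
      rw [hL, hR]
      by_cases h5 : i + 1 = 5
      · rw [h5]; simp [pvAllIn]
      · simp [h5, ih (i + 1) (by omega)]
    · have hne : ¬ (("anton".toList)[i]? = some c) := by
        rw [hp]; simpa using fun hpc => h hpc.symm
      have hL : pvScanA (c :: cs) i = pvScanA cs i := by
        simp only [pvScanA]
        rw [if_neg hne]
      rw [hL, pvAllIn_cons_ne p c _ cs h, ih i hi, hdrop]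

-- every position recorded from start index i is ≥ i
theorem pvPosB_mem_ge (ch : Char) : ∀ (cs : List Char) (i : Nat), ∀ p ∈ pvPosB cs ch i, (i : Int) ≤ p := by
  intro cs
  induction cs with
  | nil => intro i p hp; simp [pvPosB] at hp
  | cons c cs ih =>
    intro i p hp
    by_cases h : c = ch <;> simp only [pvPosB, h, if_pos, List.mem_cons] at hp
    · rcases hp with rfl | hp
      · omega
      · have := ih (i + 1) p hp; push_cast at this ⊢; omega
    · simp at hp
      have := ih (i + 1) p hp; push_cast at this ⊢; omega

-- the position list is strictly increasing
theorem pvPosB_pairwise (ch : Char) : ∀ (cs : List Char) (i : Nat), (pvPosB cs ch i).Pairwise (· < ·) := by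
  intro cs
  induction cs with
  | nil => intro i; simp [pvPosB]
  | cons c cs ih =>
    intro i
    by_cases h : c = ch <;> simp only [pvPosB, h, if_pos]
    · refine List.Pairwise.cons ?_ (ih (i + 1))
      intro p hp
      have := pvPosB_mem_ge ch cs (i + 1) p hp
      push_cast at this ⊢; omega
    · simp
      exact ih (i + 1)

-- dropping (n).toNat from a cons when n ≥ 1
theorem pvDropCons (c : Char) (l : List Char) (n : Int) (h : 1 ≤ n) :
    (c :: l).drop n.toNat = l.drop (n - 1).toNat := by
  have : n.toNat = (n - 1).toNat + 1 := by omega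
  rw [this, List.drop_succ_cons]

-- the first recorded position after cur corresponds exactly to greedy consumption on the suffix
theorem pvKey (ch : Char) : ∀ (cs : List Char) (i : Nat) (cur : Int),
    match (pvPosB cs ch i).find? (fun p => decide (cur < p)) with
    | none => pvConsume (cs.drop ((cur + 1 - i).toNat)) ch = none
    | some p => cur < p ∧ (i : Int) ≤ p ∧
        pvConsume (cs.drop ((cur + 1 - i).toNat)) ch = some (cs.drop ((p + 1 - i).toNat)) := by
  intro cs
  induction cs with
  | nil => intro i cur; simp [pvPosB, pvConsume]
  | cons c cs ih =>
    intro i cur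
    by_cases hc : c = ch
    · subst hc
      simp only [pvPosB, if_pos]
      by_cases hcur : cur < (i : Int)
      · have h0 : (cur + 1 - (i : Int)).toNat = 0 := by omega
        have h1 : ((i : Int) + 1 - i).toNat = 1 := by omega
        simp [List.find?, hcur, h0, pvConsume]
      · have hstep : ∀ m : Int, (i : Int) ≤ m → (c :: cs).drop ((m + 1 - i).toNat) = cs.drop ((m + 1 - (i + 1 : Nat)).toNat) := by
          intro m hm
          rw [pvDropCons c cs (m + 1 - i) (by omega)]
          congr 1; push_cast; omega
        have ihx := ih (i + 1) cur
        have hdec : decide (cur < (i : Int)) = false := by simpa using hcur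
        simp only [List.find?, hdec]
        cases hf : (pvPosB cs c (i + 1)).find? (fun p => decide (cur < p)) with
        | none =>
          rw [hf] at ihx
          rw [hstep cur (by omega)]
          exact ihx
        | some p =>
          rw [hf] at ihx
          obtain ⟨h1, h2, h3⟩ := ihx
          refine ⟨h1, by push_cast at h2 ⊢; omega, ?_⟩
          rw [hstep cur (by omega), hstep p (by push_cast at h2 ⊢; omega), h3]
    · simp only [pvPosB, hc, if_false]
      have hstep : ∀ m : Int, (i : Int) ≤ m → (c :: cs).drop ((m + 1 - i).toNat) = cs.drop ((m + 1 - (i + 1 : Nat)).toNat) := by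
        intro m hm
        rw [pvDropCons c cs (m + 1 - i) (by omega)]
        congr 1; push_cast; omega
      have hlow : cur < (i : Int) → pvConsume ((c :: cs).drop ((cur + 1 - i).toNat)) ch = pvConsume (cs.drop ((cur + 1 - (i + 1 : Nat)).toNat)) ch := by
        intro hcur
        have h0 : (cur + 1 - (i : Int)).toNat = 0 := by omega
        have h0' : (cur + 1 - ((i + 1 : Nat) : Int)).toNat = 0 := by push_cast; omega
        rw [h0, h0', List.drop_zero, List.drop_zero]
        simp [pvConsume, hc]
      have ihx := ih (i + 1) cur
      cases hf : (pvPosB cs ch (i + 1)).find? (fun p => decide (cur < p)) with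
      | none =>
        rw [hf] at ihx
        by_cases hcur : cur < (i : Int)
        · rw [hlow hcur]; exact ihx
        · rw [hstep cur (by omega)]; exact ihx
      | some p =>
        rw [hf] at ihx
        obtain ⟨h1, h2, h3⟩ := ihx
        have hip : (i : Int) ≤ p := by push_cast at h2 ⊢; omega
        refine ⟨h1, hip, ?_⟩
        have hsuf : (c :: cs).drop ((p + 1 - i).toNat) = cs.drop ((p + 1 - (i + 1 : Nat)).toNat) := hstep p hip
        by_cases hcur : cur < (i : Int)
        · rw [hlow hcur, hsuf]; exact h3
        · rw [hstep cur (by omega), hsuf]; exact h3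

-- sorted lists are monotone in getD
theorem pvSorted_getD_le (lst : List Int) (hpw : lst.Pairwise (· < ·)) {a b : Nat}
    (hab : a ≤ b) (hb : b < lst.length) : lst.getD a 0 ≤ lst.getD b 0 := by
  rcases Nat.lt_or_ge a b with h | h
  · have := (List.pairwise_iff_getElem.mp hpw) a b (by omega) hb h
    rw [List.getD_eq_getElem _ _ (by omega), List.getD_eq_getElem _ _ hb]
    omega
  · have : a = b := by omega
    subst this; rfl

-- unfolding equations for the binary-search loop
theorem pvBisGo_stop (n : Nat) (lst : List Int) (cur : Int) (lo hi : Nat) (h : ¬ lo < hi) :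
    pvBisGo n lst cur lo hi = lo := by
  cases n <;> simp [pvBisGo, h]

theorem pvBisGo_step (n : Nat) (lst : List Int) (cur : Int) (lo hi : Nat) (h : lo < hi) :
    pvBisGo (n + 1) lst cur lo hi = if lst.getD ((lo + hi) / 2) 0 ≤ cur then
      pvBisGo n lst cur ((lo + hi) / 2 + 1) hi else pvBisGo n lst cur lo ((lo + hi) / 2) := by
  simp [pvBisGo, h]

-- binary-search correctness: the result splits the sorted list at the first element > cur
theorem pvBis_spec (lst : List Int) (cur : Int) (hpw : lst.Pairwise (· < ·)) :
    ∀ (n lo hi : Nat), hi - lo ≤ n → lo ≤ hi → hi ≤ lst.length →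
    (∀ j < lo, lst.getD j 0 ≤ cur) → (∀ j, hi ≤ j → j < lst.length → cur < lst.getD j 0) →
    pvBisGo n lst cur lo hi ≤ lst.length ∧
    (∀ j < pvBisGo n lst cur lo hi, lst.getD j 0 ≤ cur) ∧
    (∀ j, pvBisGo n lst cur lo hi ≤ j → j < lst.length → cur < lst.getD j 0) := by
  intro n
  induction n with
  | zero =>
    intro lo hi hn hlh hhl hbefore hafter
    rw [pvBisGo_stop 0 lst cur lo hi (by omega)]
    exact ⟨by omega, hbefore, fun j hj hjl => hafter j (by omega) hjl⟩
  | succ n ih =>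
    intro lo hi hn hlh hhl hbefore hafter
    by_cases hlt : lo < hi
    · rw [pvBisGo_step n lst cur lo hi hlt]
      by_cases hmid : lst.getD ((lo + hi) / 2) 0 ≤ cur
      · rw [if_pos hmid]
        refine ih ((lo + hi) / 2 + 1) hi (by omega) (by omega) hhl ?_ hafter
        intro j hj
        exact le_trans (pvSorted_getD_le lst hpw (by omega) (by omega)) hmid
      · rw [if_neg hmid]
        refine ih lo ((lo + hi) / 2) (by omega) (by omega) (by omega) hbefore ?_
        intro j hj hjl
        exact lt_of_lt_of_le (by omega) (pvSorted_getD_le lst hpw hj hjl)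
    · rw [pvBisGo_stop (n + 1) lst cur lo hi hlt]
      exact ⟨by omega, hbefore, fun j hj hjl => hafter j (by omega) hjl⟩

-- find? with the first satisfying index known
theorem pvFind_first (lst : List Int) (p : Int → Bool) :
    ∀ r : Nat, r < lst.length → (∀ j < r, p (lst.getD j 0) = false) → p (lst.getD r 0) = true →
    lst.find? p = some (lst.getD r 0) := by
  induction lst with
  | nil => intro r hr; simp at hr
  | cons x l ih =>
    intro r hr hbefore hat
    cases r with
    | zero =>
      have hx : p x = true := by simpa using hat
      simp [List.find?, hx]
    | succ r =>
      have hx : p x = false := by simpa using hbefore 0 (by omega)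
      simp only [List.find?, hx]
      exact ih r (by simpa using hr)
        (fun j hj => by simpa using hbefore (j + 1) (Nat.succ_lt_succ hj))
        (by simpa using hat)

theorem pvFind_none (lst : List Int) (p : Int → Bool)
    (h : ∀ j < lst.length, p (lst.getD j 0) = false) : lst.find? p = none := by
  induction lst with
  | nil => rfl
  | cons x l ih =>
    have hx : p x = false := by simpa using h 0 (by simp)
    simp only [List.find?, hx]
    exact ih (fun j hj => by simpa using h (j + 1) (Nat.succ_lt_succ hj))

-- dictionary lookups in the occurrence index
theorem pvOcc_get (cs : List Char) (ch : Char) (h : ch ∈ "anton".toList) :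
    ((pvOccB cs).get? ch).getD [] = pvPosB cs ch 0 := by
  have hl : "anton".toList = ['a', 'n', 't', 'o', 'n'] := rfl
  rw [hl] at h
  simp only [List.mem_cons, List.not_mem_nil, or_false] at h
  unfold pvOccB
  rw [hl]
  simp only [List.foldl]
  rcases h with rfl | rfl | rfl | rfl | rfl <;>
    simp [PySem.Dict.get?_insert]

-- B's pattern loop over the occurrence index equals the reference greedy test on the suffix
theorem pvMatch_eq (cs : List Char) : ∀ (ps : List Char), (∀ c ∈ ps, c ∈ "anton".toList) →
    ∀ cur : Int, -1 ≤ cur →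
    pvMatchB (pvOccB cs) ps cur = pvAllIn ps (cs.drop (cur + 1).toNat) := by
  intro ps
  induction ps with
  | nil => intro _ cur _; simp [pvMatchB, pvAllIn]
  | cons ch ps ih =>
    intro hsub cur hcur
    have hch : ch ∈ "anton".toList := hsub ch (by simp)
    have hlst : ((pvOccB cs).get? ch).getD [] = pvPosB cs ch 0 := pvOcc_get cs ch hch
    set lst := pvPosB cs ch 0 with hlstdef
    have hpw : lst.Pairwise (· < ·) := pvPosB_pairwise ch cs 0
    have hconv : pvBisB lst cur 0 lst.length = pvBisGo lst.length lst cur 0 lst.length := rfl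
    obtain ⟨hr1, hr2, hr3⟩ := pvBis_spec lst cur hpw lst.length 0 lst.length (by omega)
      (by omega) (le_refl _) (by omega) (by omega)
    rw [← hconv] at hr1 hr2 hr3
    set r := pvBisB lst cur 0 lst.length with hrdef
    have hkey := pvKey ch cs 0 cur
    have h0 : ((0 : Nat) : Int) = 0 := rfl
    simp only [h0, sub_zero] at hkey
    by_cases hre : r = lst.length
    · -- no position after cur: find? = none, consume = none, both sides false
      have hfind : lst.find? (fun p => decide (cur < p)) = none := by
        apply pvFind_none
        intro j hj
        simpa using not_lt.mpr (hr2 j (by omega))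
      rw [hfind] at hkey
      have hkey' : pvConsume (cs.drop (cur + 1).toNat) ch = none := hkey
      have hA : pvAllIn (ch :: ps) (cs.drop (cur + 1).toNat) = false := by
        simp [pvAllIn, hkey']
      rw [hA]
      simp only [pvMatchB, hlst, ← hrdef, hre]
      simp
    · have hrlt : r < lst.length := by omega
      have hfind : lst.find? (fun p => decide (cur < p)) = some (lst.getD r 0) := by
        apply pvFind_first lst _ r hrlt
        · intro j hj
          simpa using not_lt.mpr (hr2 j hj)
        · simpa using hr3 r (le_refl _) hrlt
      rw [hfind] at hkey
      obtain ⟨hk1, hk2, hk3⟩ := hkey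
      have hA : pvAllIn (ch :: ps) (cs.drop (cur + 1).toNat) =
          pvAllIn ps (cs.drop (lst.getD r 0 + 1).toNat) := by
        simp [pvAllIn, hk3]
      rw [hA]
      have hB : pvMatchB (pvOccB cs) (ch :: ps) cur = pvMatchB (pvOccB cs) ps (lst.getD r 0) := by
        simp only [pvMatchB, hlst, ← hrdef]
        rw [if_neg hre]
      rw [hB]
      exact ih (fun c hc => hsub c (by simp [hc])) (lst.getD r 0) (by omega)

-- per-line equality of the two tests
theorem pvLine_eq (line : String) :
    pvScanA line.toList 0 = pvMatchB (pvOccB line.toList) "anton".toList (-1) := by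
  rw [pvScan_eq line.toList 0 (by norm_num), pvMatch_eq line.toList "anton".toList
    (fun c hc => hc) (-1) (by norm_num)]
  norm_num

theorem pvLoop_eq (data : List String) : ∀ idx : Int, pvLoopA data idx = pvLoopB data idx := by
  induction data with
  | nil => intro idx; rfl
  | cons line rest ih =>
    intro idx
    simp [pvLoopA, pvLoopB, pvLine_eq line, ih]

-- ===== VERDICT (by name: the statement is the Claim_ definition above) =====
theorem find_infected_fridges_spec : Claim_equal_find_infected_fridges := by
  intro data _
  unfold Spec_find_infected_fridges find_infected_fridges find_infected_fridges_alt
  exact pvLoop_eq data 1
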